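-- pv_equiv track=rewrite | github.com/AxelsFirst/tda-pk | tda/vr_complex.py | check_nesting
-- ===== SOURCE A (Python) =====
-- from copy import copy
--
-- def check_nesting(higher_simplices, lower_simplices):
--     """
--
--     Find which simplices are nested in others.
--
--     Parameters:
--     -----------
--     higher_simplices : tuple
--         A tuple of simplices of higher dimension.
--     lower_simplices : tuple
--         A tuple of simplices of lower dimension.
--
--     Output:
--     -------
--     nested_simplices : dict
--         A dictionary of nested simplices.
--     present_lower_simplices : list
--         A list of simplices that are present as values in dictionary.
--
--     Notes:
--     ------
--     Simplices have to be of one higher dimension that the others.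
--
--     """
--
--     nested_simplices = {}
--     present_lower_simplices = []
--     for higher_simplex in higher_simplices:
--         copied_lower_simplices = []
--         temporary_lower_simplices = []
--
--         for point_index in range(len(higher_simplex)):
--             copied_simplex = list(copy(higher_simplex))
--             copied_simplex.pop(point_index)
--             copied_lower_simplices.append(tuple(copied_simplex))
--
--         for lower_simplex in lower_simplices:
--             if lower_simplex in copied_lower_simplices:
--                 temporary_lower_simplices.append(lower_simplex)
--                 if lower_simplex not in present_lower_simplices:
--                     present_lower_simplices.append(lower_simplex)
--
--         nested_simplices[higher_simplex] = temporary_lower_simplices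
--
--     return nested_simplices, present_lower_simplices
-- ===== SOURCE B (Python) =====
-- def check_nesting(higher_simplices, lower_simplices):
--     # Index every lower simplex by its occurrence positions once, then look faces up directly.
--     positions = {}
--     for index, lower_simplex in enumerate(lower_simplices):
--         positions.setdefault(lower_simplex, []).append(index)
--     nested_simplices = {}
--     present_lower_simplices = []
--     for higher_simplex in higher_simplices:
--         indices = set()
--         for k in range(len(higher_simplex)):
--             face = higher_simplex[:k] + higher_simplex[k + 1:]
--             indices.update(positions.get(face, []))
--         chunk = [lower_simplices[i] for i in sorted(indices)]
--         nested_simplices[higher_simplex] = chunk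
--         for lower_simplex in chunk:
--             if lower_simplex not in present_lower_simplices:
--                 present_lower_simplices.append(lower_simplex)
--     return nested_simplices, present_lower_simplices
-- ===== Notes on version B (the rewrite author's own statement) =====
-- stated objective: faster
-- what changed: Instead of scanning all lower_simplices once per higher simplex and testing membership in the face list, B builds a dict mapping each lower-simplex tuple to its occurrence indices once, looks each generated face up directly, and reconstructs the nested list from the sorted matching indices.
import Mathlib
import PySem

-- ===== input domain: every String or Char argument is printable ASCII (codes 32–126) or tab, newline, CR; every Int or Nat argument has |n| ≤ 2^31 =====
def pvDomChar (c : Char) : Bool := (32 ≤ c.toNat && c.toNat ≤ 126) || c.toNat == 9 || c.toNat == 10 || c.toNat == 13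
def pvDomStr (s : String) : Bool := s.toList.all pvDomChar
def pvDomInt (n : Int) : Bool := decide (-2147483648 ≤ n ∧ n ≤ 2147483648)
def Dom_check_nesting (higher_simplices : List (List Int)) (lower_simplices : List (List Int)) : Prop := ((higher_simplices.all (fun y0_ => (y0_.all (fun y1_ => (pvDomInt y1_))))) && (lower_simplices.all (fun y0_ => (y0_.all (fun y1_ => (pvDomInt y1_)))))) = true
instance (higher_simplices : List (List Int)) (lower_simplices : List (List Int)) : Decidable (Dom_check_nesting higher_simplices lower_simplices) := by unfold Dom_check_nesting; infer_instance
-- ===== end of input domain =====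

-- B replaces A's per-higher scan of all lower simplices by a positions dict built once; equal return values are proved below.

-- ===== PORT A =====
-- copied_simplex.pop(point_index): the list with that index removed (index always in range here)
def pvPopAt (l : List Int) (i : Int) : List Int := ((PySem.List.pop? l i).map (·.2)).getD []

def check_nesting (higher_simplices : List (List Int)) (lower_simplices : List (List Int)) : (List (List Int × List (List Int))) × List (List Int) :=
  let st := higher_simplices.foldl
    (fun (st : PySem.Dict (List Int) (List (List Int)) × List (List Int)) h =>
      let copied_lower_simplices := (PySem.List.pyRange 0 (h.length : Int) 1).foldl
        (fun acc point_index => acc ++ [pvPopAt h point_index]) []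
      let tp := lower_simplices.foldl
        (fun (tp : List (List Int) × List (List Int)) l =>
          if l ∈ copied_lower_simplices then
            (tp.1 ++ [l], if l ∈ tp.2 then tp.2 else tp.2 ++ [l])
          else tp)
        ([], st.2)
      (st.1.insert h tp.1, tp.2))
    (PySem.Dict.empty, [])
  (st.1.items, st.2)

-- ===== PORT B =====
def check_nesting_alt (higher_simplices : List (List Int)) (lower_simplices : List (List Int)) : (List (List Int × List (List Int))) × List (List Int) :=
  let positions : PySem.Dict (List Int) (List Int) :=
    (PySem.List.enumerate lower_simplices).foldl
      (fun d p => d.modify p.2 [] (· ++ [p.1])) PySem.Dict.empty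
  let st := higher_simplices.foldl
    (fun (st : PySem.Dict (List Int) (List (List Int)) × List (List Int)) h =>
      let indices : PySem.Set Int := (PySem.List.pyRange 0 (h.length : Int) 1).foldl
        (fun s k => PySem.Set.update s
          (positions.getD (PySem.List.slice h none (some k) ++ PySem.List.slice h (some (k + 1)) none) []))
        PySem.Set.empty
      let chunk := (PySem.List.sorted indices (fun x => x) false).map
        (fun i => PySem.List.pyGetD lower_simplices i [])
      let pres := chunk.foldl (fun p l => if l ∈ p then p else p ++ [l]) st.2
      (st.1.insert h chunk, pres))
    (PySem.Dict.empty, [])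
  (st.1.items, st.2)

-- ===== PRECONDITION & SPEC =====
def Spec_check_nesting (higher_simplices : List (List Int)) (lower_simplices : List (List Int)) (out : (List (List Int × List (List Int))) × List (List Int)) : Prop := out = check_nesting_alt higher_simplices lower_simplices
instance (higher_simplices : List (List Int)) (lower_simplices : List (List Int)) (out : (List (List Int × List (List Int))) × List (List Int)) : Decidable (Spec_check_nesting higher_simplices lower_simplices out) := by unfold Spec_check_nesting; infer_instance

-- ===== CLAIM (what is proved, stated in full; the proofs are below) =====
def Claim_equal_check_nesting : Prop := ∀ (higher_simplices : List (List Int)) (lower_simplices : List (List Int)), Dom_check_nesting higher_simplices lower_simplices → Spec_check_nesting higher_simplices lower_simplices (check_nesting higher_simplices lower_simplices)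

-- ===== LEMMAS AND PROOFS =====

def pvFaces (h : List Int) : List (List Int) :=
  (List.range h.length).map (fun k => List.take k h ++ List.drop (k+1) h)

def pvPos (L : List (List Int)) : PySem.Dict (List Int) (List Int) :=
  (PySem.List.enumerate L).foldl (fun d p => d.modify p.2 [] (· ++ [p.1])) PySem.Dict.empty

theorem facesA_eq (h : List Int) :
    (PySem.List.pyRange 0 (h.length : Int) 1).foldl (fun acc i => acc ++ [pvPopAt h i]) [] = pvFaces h := by
  rw [PySem.List.foldl_append_singleton_eq_map, PySem.List.pyRange_zero_natCast, List.map_map]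
  simp only [List.nil_append, pvFaces]
  apply List.map_congr_left
  intro k hk
  simp only [List.mem_range] at hk
  simp [Function.comp, pvPopAt, PySem.List.pop?_natCast h k hk, List.eraseIdx_eq_take_drop_succ]

theorem pos_getD (L : List (List Int)) (c : List Int) :
    (pvPos L).getD c [] = ((PySem.List.enumerate L).filter (fun p => p.2 == c)).map (·.1) := by
  unfold pvPos
  have : (PySem.List.enumerate L).foldl (fun d p => d.modify p.2 [] (· ++ [p.1])) PySem.Dict.empty
      = ((PySem.List.enumerate L).map (fun p => (p.2, p.1))).foldl
          (fun d q => d.modify q.1 [] (· ++ [q.2])) PySem.Dict.empty := by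
    rw [List.foldl_map]
  rw [this, PySem.Dict.getD_foldl_modify_append, List.filter_map]
  simp only [PySem.Dict.getD_empty, List.nil_append, Function.comp_def, List.map_map]

theorem mem_pos_getD (L : List (List Int)) (c : List Int) (y : Int) :
    y ∈ (pvPos L).getD c [] ↔ ∃ k : Nat, ∃ _ : k < L.length, y = (k : Int) ∧ L[k] = c := by
  rw [pos_getD]
  simp only [List.mem_map, List.mem_filter, PySem.List.mem_enumerate_iff]
  constructor
  · rintro ⟨p, ⟨⟨k, hk, rfl⟩, hc⟩, rfl⟩
    simp at hc
    exact ⟨k, hk, by simp, hc⟩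
  · rintro ⟨k, hk, rfl, hc⟩
    exact ⟨((k : Int), L[k]), ⟨⟨k, hk, by simp⟩, by simp [hc]⟩, rfl⟩

theorem mem_foldl_update (g : List Int → List Int) (faces : List (List Int)) (s : PySem.Set Int) (y : Int) :
    y ∈ faces.foldl (fun s f => PySem.Set.update s (g f)) s ↔ y ∈ s ∨ ∃ f ∈ faces, y ∈ g f := by
  induction faces generalizing s with
  | nil => simp
  | cons f fs ih =>
    simp only [List.foldl_cons, ih, PySem.Set.mem_update, List.mem_cons]
    constructor
    · rintro (⟨h | h⟩ | ⟨f', hf', hy⟩)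
      · exact Or.inl h
      · exact Or.inr ⟨f, Or.inl rfl, h⟩
      · exact Or.inr ⟨f', Or.inr hf', hy⟩
    · rintro (h | ⟨f', (rfl | hf'), hy⟩)
      · exact Or.inl (Or.inl h)
      · exact Or.inl (Or.inr hy)
      · exact Or.inr ⟨f', hf', hy⟩

theorem nodup_foldl_update (g : List Int → List Int) (faces : List (List Int)) (s : PySem.Set Int)
    (hs : s.Nodup) : (faces.foldl (fun s f => PySem.Set.update s (g f)) s).Nodup := by
  induction faces generalizing s with
  | nil => exact hs
  | cons f fs ih => exact ih _ (PySem.Set.nodup_update s (g f) hs)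

def pvTarget (L : List (List Int)) (faces : List (List Int)) : List Int :=
  ((PySem.List.enumerate L).filter (fun p => decide (p.2 ∈ faces))).map (·.1)

theorem pairwise_target (L : List (List Int)) (faces : List (List Int)) :
    (pvTarget L faces).Pairwise (fun a b => a < b) := by
  unfold pvTarget
  rw [List.pairwise_map]
  exact (PySem.List.pairwise_lt_enumerate L 0).filter _

theorem nodup_target (L : List (List Int)) (faces : List (List Int)) :
    (pvTarget L faces).Nodup := by
  exact (pairwise_target L faces).imp (fun hab => ne_of_lt hab)

theorem mem_target (L : List (List Int)) (faces : List (List Int)) (y : Int) :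
    y ∈ pvTarget L faces ↔ ∃ k : Nat, ∃ _ : k < L.length, y = (k : Int) ∧ L[k] ∈ faces := by
  unfold pvTarget
  simp only [List.mem_map, List.mem_filter, PySem.List.mem_enumerate_iff, decide_eq_true_eq]
  constructor
  · rintro ⟨p, ⟨⟨k, hk, rfl⟩, hf⟩, rfl⟩
    exact ⟨k, hk, by simp, hf⟩
  · rintro ⟨k, hk, rfl, hf⟩
    exact ⟨((k : Int), L[k]), ⟨⟨k, hk, by simp⟩, hf⟩, rfl⟩

theorem sorted_idxs (L : List (List Int)) (faces : List (List Int)) :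
    PySem.List.sorted
      (faces.foldl (fun s f => PySem.Set.update s ((pvPos L).getD f [])) PySem.Set.empty)
      (fun x => x) false = pvTarget L faces := by
  apply PySem.List.sorted_eq_of_perm_of_pairwise_lt
  · rw [List.perm_ext_iff_of_nodup (nodup_target L faces)
      (nodup_foldl_update _ faces PySem.Set.empty List.nodup_nil)]
    intro y
    rw [mem_target, mem_foldl_update]
    simp only [PySem.Set.empty, List.not_mem_nil, false_or]
    constructor
    · rintro ⟨k, hk, rfl, hf⟩
      exact ⟨L[k], hf, (mem_pos_getD L _ _).mpr ⟨k, hk, rfl, rfl⟩⟩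
    · rintro ⟨f, hf, hy⟩
      obtain ⟨k, hk, rfl, hc⟩ := (mem_pos_getD L _ _).mp hy
      exact ⟨k, hk, rfl, hc ▸ hf⟩
  · exact pairwise_target L faces

theorem chunk_eq (L : List (List Int)) (faces : List (List Int)) :
    (pvTarget L faces).map (fun i => PySem.List.pyGetD L i []) =
      L.filter (fun l => decide (l ∈ faces)) := by
  unfold pvTarget
  rw [List.map_map]
  have h1 : ∀ p ∈ (PySem.List.enumerate L).filter (fun p => decide (p.2 ∈ faces)),
      ((fun i => PySem.List.pyGetD L i []) ∘ (·.1)) p = p.2 := by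
    intro p hp
    obtain ⟨k, hk, rfl⟩ := (PySem.List.mem_enumerate_iff L 0 p).mp (List.mem_of_mem_filter hp)
    simp [PySem.List.pyGetD_natCast, List.getD_eq_getElem?_getD, hk]
  rw [List.map_congr_left h1]
  have h2 := @List.filter_map (Int × List Int) (List Int) (fun p : Int × List Int => p.2)
    (fun l => decide (l ∈ faces)) (PySem.List.enumerate L)
  rw [PySem.List.map_snd_enumerate] at h2
  rw [h2]
  rfl

theorem innerA_eq (faces : List (List Int)) (L : List (List Int)) (t0 p0 : List (List Int)) :
    L.foldl (fun (tp : List (List Int) × List (List Int)) l =>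
        if l ∈ faces then (tp.1 ++ [l], if l ∈ tp.2 then tp.2 else tp.2 ++ [l]) else tp) (t0, p0)
    = (t0 ++ L.filter (fun l => decide (l ∈ faces)),
       (L.filter (fun l => decide (l ∈ faces))).foldl
         (fun p l => if l ∈ p then p else p ++ [l]) p0) := by
  induction L generalizing t0 p0 with
  | nil => simp
  | cons l ls ih =>
    by_cases hl : l ∈ faces
    · simp only [List.foldl_cons, List.filter_cons, hl, decide_true, ih]
      simp
    · simp only [List.foldl_cons, List.filter_cons, hl, decide_false, ih]
      simp

def pvStepA (L : List (List Int)) :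
    PySem.Dict (List Int) (List (List Int)) × List (List Int) → List Int →
    PySem.Dict (List Int) (List (List Int)) × List (List Int) := fun st h =>
  let copied_lower_simplices := (PySem.List.pyRange 0 (h.length : Int) 1).foldl
    (fun acc point_index => acc ++ [pvPopAt h point_index]) []
  let tp := L.foldl
    (fun (tp : List (List Int) × List (List Int)) l =>
      if l ∈ copied_lower_simplices then
        (tp.1 ++ [l], if l ∈ tp.2 then tp.2 else tp.2 ++ [l])
      else tp)
    ([], st.2)
  (st.1.insert h tp.1, tp.2)

def pvStepB (L : List (List Int)) :
    PySem.Dict (List Int) (List (List Int)) × List (List Int) → List Int →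
    PySem.Dict (List Int) (List (List Int)) × List (List Int) := fun st h =>
  let indices : PySem.Set Int := (PySem.List.pyRange 0 (h.length : Int) 1).foldl
    (fun s k => PySem.Set.update s
      ((pvPos L).getD (PySem.List.slice h none (some k) ++ PySem.List.slice h (some (k + 1)) none) []))
    PySem.Set.empty
  let chunk := (PySem.List.sorted indices (fun x => x) false).map
    (fun i => PySem.List.pyGetD L i [])
  let pres := chunk.foldl (fun p l => if l ∈ p then p else p ++ [l]) st.2
  (st.1.insert h chunk, pres)

theorem step_eq (L : List (List Int)) : pvStepA L = pvStepB L := by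
  funext st h
  have hidx : (PySem.List.pyRange 0 (h.length : Int) 1).foldl
      (fun s k => PySem.Set.update s
        ((pvPos L).getD (PySem.List.slice h none (some k) ++ PySem.List.slice h (some (k + 1)) none) []))
      PySem.Set.empty
      = (pvFaces h).foldl (fun s f => PySem.Set.update s ((pvPos L).getD f [])) PySem.Set.empty := by
    rw [PySem.List.pyRange_zero_natCast, List.foldl_map]
    unfold pvFaces
    rw [List.foldl_map]
    have : (fun (s : PySem.Set Int) (k : Nat) => PySem.Set.update s
        ((pvPos L).getD (PySem.List.slice h none (some (k : Int)) ++ PySem.List.slice h (some ((k : Int) + 1)) none) []))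
        = (fun s k => PySem.Set.update s ((pvPos L).getD (List.take k h ++ List.drop (k+1) h) [])) := by
      funext s k
      rw [PySem.List.slice_to_natCast]
      have hc : ((k : Int) + 1) = ((k + 1 : Nat) : Int) := by push_cast; ring
      rw [hc, PySem.List.slice_from_natCast]
    rw [this]
  show pvStepA L st h = pvStepB L st h
  unfold pvStepA pvStepB
  simp only [hidx, sorted_idxs, chunk_eq, facesA_eq, innerA_eq, List.nil_append]


theorem check_eq (H L : List (List Int)) : check_nesting H L = check_nesting_alt H L := by
  show (let st := H.foldl (pvStepA L) (PySem.Dict.empty, []); (st.1.items, st.2))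
     = (let st := H.foldl (pvStepB L) (PySem.Dict.empty, []); (st.1.items, st.2))
  rw [step_eq]

-- ===== VERDICT (by name: the statement is the Claim_ definition above) =====
theorem check_nesting_spec : Claim_equal_check_nesting := by
  intro H L _
  unfold Spec_check_nesting
  exact check_eq H L
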